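-- pv_equiv track=rewrite | github.com/morikouhei/programming_contest | atcoder/abc/abc250/e.py | rolling_hash
-- ===== SOURCE A (Python) =====
-- base = 3*10**5+7; mod = 10**9 + 9
--
-- base = 3*10**5+7; mod = 10**9 + 9
--
-- def rolling_hash(s):
--     l = len(s)
--     h = [0]*(l + 1)
--     lis = set()
--
--     for i in range(l):
--         s1 = s[i]
--         if s1 in lis:
--             h[i+1] = h[i]
--         else:
--             h[i+1] = (h[i]+pow(base,s1,mod)) % mod
--         lis.add(s1)
--     return h
-- ===== SOURCE B (Python) =====
-- base = 3*10**5+7; mod = 10**9 + 9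
--
-- def rolling_hash(s):
--     l = len(s)
--     # map each distinct value to its first-occurrence index: build the dict
--     # backwards, so later assignments (smaller indices) overwrite and the
--     # earliest index survives -- no membership test anywhere
--     first = {}
--     for i in range(l - 1, -1, -1):
--         first[s[i]] = i
--     # scatter each distinct value's hash contribution at its first occurrence
--     contrib = [0] * l
--     for x, i in first.items():
--         contrib[i] = pow(base, x, mod)
--     # prefix-sum the contributions
--     h = [0]
--     acc = 0
--     for d in contrib:
--         acc = (acc + d) % mod
--         h.append(acc)
--     return h
-- ===== Notes on version B (the rewrite author's own statement) =====
-- stated objective: alternative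
-- what changed: A does one fused forward pass with a seen-set membership test per element; B has no membership test at all: it builds a dict mapping each distinct value to its first-occurrence index by iterating the indices BACKWARDS (later, smaller-index assignments overwrite), then scatters pow(base,x,mod) into a contribution array at those first-occurrence indices, and finally prefix-sums that array mod m.
import Mathlib
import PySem

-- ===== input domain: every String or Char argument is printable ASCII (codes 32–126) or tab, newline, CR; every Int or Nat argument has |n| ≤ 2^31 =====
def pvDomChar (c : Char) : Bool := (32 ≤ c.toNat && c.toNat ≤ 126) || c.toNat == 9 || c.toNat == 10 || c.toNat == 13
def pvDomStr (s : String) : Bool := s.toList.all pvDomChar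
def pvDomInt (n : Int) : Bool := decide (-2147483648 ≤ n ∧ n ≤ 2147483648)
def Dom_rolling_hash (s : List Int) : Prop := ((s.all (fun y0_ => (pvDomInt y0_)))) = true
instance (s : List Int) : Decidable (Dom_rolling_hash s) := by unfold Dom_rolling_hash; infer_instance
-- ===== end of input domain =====

-- B replaces A's fused seen-set loop by a different algorithm: a backwards pass builds a
-- dict from each distinct value to its first-occurrence index, a scatter pass places the
-- hash contributions at those indices, and a prefix-sum pass produces h (objective: alternative).


-- ===== PORT A =====
-- module constant: mod = 10**9+9 (base = 3*10**5+7 = 300007 appears inside pvPowBase)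
def pvMod : Int := 10^9+9

-- fast b^e % m on Nat (binary exponentiation); value = Python pow(b, e, m) for e ≥ 0
def pvPowModNat (b e m : Nat) : Nat :=
  if h : e = 0 then 1 % m
  else
    let r := pvPowModNat b (e / 2) m
    if e % 2 = 0 then r * r % m else r * r % m * (b % m) % m
termination_by e
decreasing_by omega

-- pow(base, e, mod) ported BY HAND (PySem.Int.powMod takes only Nat exponents and its body
-- `b ^ e % m` cannot be evaluated for |e| up to 2^31): for e ≥ 0 binary exponentiation is
-- exact; for e < 0 Python uses the modular inverse of base, which equals base^(mod-2) mod mod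
-- by Fermat (mod = 10^9+9 is prime, base = 300007 is coprime to it), so this is exact too.
def pvPowBase (e : Int) : Int :=
  if 0 ≤ e then ((pvPowModNat 300007 e.toNat 1000000009 : Nat) : Int)
  else ((pvPowModNat (pvPowModNat 300007 1000000007 1000000009) (-e).toNat 1000000009 : Nat) : Int)

def rolling_hash (s : List Int) : List Int :=
  let l := s.length
  ((PySem.List.pyRange 0 (l : Int) 1).foldl
    (fun (st : List Int × PySem.Set Int) i =>
      let s1 := PySem.List.pyGetD s i 0
      let hi := PySem.List.pyGetD st.1 i 0
      ((if st.2.contains s1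
        then PySem.List.pySetD st.1 (i+1) hi
        else PySem.List.pySetD st.1 (i+1) (PySem.Int.mod (hi + pvPowBase s1) pvMod)),
       PySem.Set.add st.2 s1))
    (List.replicate (l+1) (0 : Int), PySem.Set.empty)).1

-- ===== PORT B =====
def rolling_hash_alt (s : List Int) : List Int :=
  let l := s.length
  -- first = {}; for i in range(l-1, -1, -1): first[s[i]] = i
  let first := (PySem.List.pyRange ((l : Int) - 1) (-1) (-1)).foldl
    (fun (d : PySem.Dict Int Int) i => d.insert (PySem.List.pyGetD s i 0) i)
    PySem.Dict.empty
  -- contrib = [0]*l; for x, i in first.items(): contrib[i] = pow(base, x, mod)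
  let contrib := first.items.foldl
    (fun (arr : List Int) p => PySem.List.pySetD arr p.2 (pvPowBase p.1))
    (List.replicate l (0 : Int))
  -- h = [0]; acc = 0; for d in contrib: acc = (acc + d) % mod; h.append(acc)
  (contrib.foldl
    (fun (st : List Int × Int) d =>
      let acc := PySem.Int.mod (st.2 + d) pvMod
      (st.1 ++ [acc], acc))
    ([(0 : Int)], (0 : Int))).1

-- ===== PRECONDITION & SPEC =====
def Spec_rolling_hash (s : List Int) (out : List Int) : Prop := out = rolling_hash_alt s
instance (s : List Int) (out : List Int) : Decidable (Spec_rolling_hash s out) := by unfold Spec_rolling_hash; infer_instance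

-- ===== CLAIM (what is proved, stated in full; the proofs are below) =====
def Claim_equal_rolling_hash : Prop := ∀ (s : List Int), Dom_rolling_hash s → Spec_rolling_hash s (rolling_hash s)

-- ===== LEMMAS AND PROOFS =====

-- writing A's h[i+1] hits the first cell after the already-computed prefix
theorem pvSetMid (H R : List Int) (g z v : Int) :
    (H ++ g :: z :: R).set (H.length + 1) v = H ++ g :: v :: R := by
  induction H with
  | nil => simp
  | cons h t ih => simp [List.set_cons_succ, ih]

-- A's loop, abstracted: reduced running hash g, emitting one value per element
def pvAscan (seen : PySem.Set Int) (g : Int) : List Int → List Int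
  | [] => []
  | x :: xs =>
    let v := if seen.contains x then g else PySem.Int.mod (g + pvPowBase x) pvMod
    v :: pvAscan (PySem.Set.add seen x) v xs

-- first-occurrence delta list, abstracted (what B's scatter produces)
def pvDeltas (seen : PySem.Set Int) : List Int → List Int
  | [] => []
  | x :: xs => (if seen.contains x then 0 else pvPowBase x) :: pvDeltas (PySem.Set.add seen x) xs

-- B's third pass, abstracted: reduced accumulator
def pvCscan (a : Int) : List Int → List Int
  | [] => []
  | d :: ds => PySem.Int.mod (a + d) pvMod :: pvCscan (PySem.Int.mod (a + d) pvMod) ds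

theorem pvA_loop (xs : List Int) : ∀ (s : List Int) (a : Nat) (seen : PySem.Set Int)
    (H : List Int) (g : Int), s.drop a = xs → H.length = a →
    ((PySem.List.pyRange a (s.length : Int) 1).foldl
      (fun (st : List Int × PySem.Set Int) i =>
        let s1 := PySem.List.pyGetD s i 0
        let hi := PySem.List.pyGetD st.1 i 0
        ((if st.2.contains s1
          then PySem.List.pySetD st.1 (i+1) hi
          else PySem.List.pySetD st.1 (i+1) (PySem.Int.mod (hi + pvPowBase s1) pvMod)),
         PySem.Set.add st.2 s1))
      (H ++ g :: List.replicate xs.length (0 : Int), seen)).1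
    = H ++ g :: pvAscan seen g xs := by
  induction xs with
  | nil =>
    intro s a seen H g hdrop hH
    rw [PySem.List.pyRange_one_eq_nil
      (by exact_mod_cast List.drop_eq_nil_iff.mp hdrop)]
    simp [pvAscan]
  | cons x xs ih =>
    intro s a seen H g hdrop hH
    subst hH
    have hlt : H.length < s.length := by
      by_contra hcon
      rw [List.drop_eq_nil_iff.mpr (by omega)] at hdrop
      simp at hdrop
    have hx : s[H.length]? = some x := by
      have h0 : (s.drop H.length)[0]? = some x := by rw [hdrop]; rfl
      simpa using h0
    have hdrop' : s.drop (H.length + 1) = xs := by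
      rw [← List.tail_drop, hdrop]; rfl
    have hcast : ((H.length : Int) + 1) = (((H.length + 1 : Nat)) : Int) := by push_cast; ring
    rw [PySem.List.pyRange_one_cons (by exact_mod_cast hlt), List.foldl_cons]
    by_cases hc : x ∈ seen <;>
    · have hcb : seen.contains x = decide (x ∈ seen) := by simp
      simp only [hcast, PySem.List.pyGetD_natCast, PySem.List.pySetD_natCast,
        List.getD_eq_getElem?_getD, hx, List.getElem?_append_right (Nat.le_refl H.length),
        Nat.sub_self, List.getElem?_cons_zero, Option.getD_some, List.length_cons,
        List.replicate_succ, pvSetMid, hcb, hc, decide_true, decide_false, if_true, if_false,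
        Bool.false_eq_true]
      have h2 := ih s (H.length + 1) (PySem.Set.add seen x) (H ++ [g])
        (if x ∈ seen then g else PySem.Int.mod (g + pvPowBase x) pvMod) hdrop' (by simp)
      simp only [hc, if_true, if_false, List.append_assoc,
        List.cons_append, List.nil_append] at h2
      rw [h2]
      simp [pvAscan, hc]

theorem pvA_eq (s : List Int) : rolling_hash s = 0 :: pvAscan PySem.Set.empty 0 s := by
  have h := pvA_loop s s 0 PySem.Set.empty [] 0 (by simp) (by simp)
  simpa [rolling_hash, List.replicate_succ] using h

-- bridge: B's reduced prefix scan of the delta list is A's fused scan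
theorem pvBridge (xs : List Int) : ∀ (seen : PySem.Set Int) (r : Int),
    0 ≤ r → r < pvMod → pvCscan r (pvDeltas seen xs) = pvAscan seen r xs := by
  induction xs with
  | nil => intro seen r _ _; simp [pvDeltas, pvCscan, pvAscan]
  | cons x xs ih =>
    intro seen r h0 h1
    have hm : (0 : Int) < pvMod := by norm_num [pvMod]
    by_cases hc : seen.contains x
    · have hr : PySem.Int.mod (r + 0) pvMod = r := by
        rw [add_zero, PySem.Int.mod_eq_emod_of_pos hm, Int.emod_eq_of_lt h0 h1]
      simp only [pvDeltas, pvCscan, pvAscan, hc, if_true, hr]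
      exact congrArg _ (ih (PySem.Set.add seen x) r h0 h1)
    · simp only [pvDeltas, pvCscan, pvAscan, hc, if_false, Bool.false_eq_true]
      exact congrArg _ (ih (PySem.Set.add seen x)
        (PySem.Int.mod (r + pvPowBase x) pvMod)
        (PySem.Int.mod_nonneg _ hm) (PySem.Int.mod_lt _ hm))

-- B's third pass is pvCscan
theorem pvB_pass3 (ds : List Int) : ∀ (H : List Int) (a : Int),
    (ds.foldl
      (fun (st : List Int × Int) d =>
        let acc := PySem.Int.mod (st.2 + d) pvMod
        (st.1 ++ [acc], acc))
      (H, a)).1 = H ++ pvCscan a ds := by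
  induction ds with
  | nil => intro H a; simp [pvCscan]
  | cons d ds ih =>
    intro H a
    simp only [List.foldl_cons]
    rw [ih]
    simp [pvCscan]

-- positional characterisation of the delta list
theorem pvDeltas_getElem? (xs : List Int) : ∀ (pre : List Int) (j : Nat),
    (pvDeltas (PySem.Set.ofList pre) xs)[j]? =
      (xs[j]?).map (fun x => if x ∈ pre ∨ x ∈ xs.take j then 0 else pvPowBase x) := by
  induction xs with
  | nil => intro pre j; simp [pvDeltas]
  | cons x xs ih =>
    intro pre j
    cases j with
    | zero =>
      by_cases hx : x ∈ pre <;>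
        simp [pvDeltas, hx]
    | succ j =>
      have hadd : PySem.Set.add (PySem.Set.ofList pre) x = PySem.Set.ofList (pre ++ [x]) :=
        (PySem.Set.ofList_append_singleton pre x).symm
      simp only [pvDeltas, List.getElem?_cons_succ, hadd, ih (pre ++ [x]) j,
        List.take_succ_cons]
      cases hxe : xs[j]? with
      | none => rfl
      | some y =>
        simp only [Option.map_some]
        refine congrArg some (if_congr ?_ rfl rfl)
        simp only [List.mem_append, List.mem_cons]
        tauto

-- the backwards dict-building loop: get? is the first-occurrence index
theorem pvDict_loop (s : List Int) : ∀ (k : Nat) (d : PySem.Dict Int Int), k ≤ s.length →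
    ∀ x, ((PySem.List.pyRange ((k : Int) - 1) (-1) (-1)).foldl
      (fun (d : PySem.Dict Int Int) i => d.insert (PySem.List.pyGetD s i 0) i) d).get? x
    = if x ∈ s.take k then some ((List.idxOf x (s.take k) : Nat) : Int) else d.get? x := by
  intro k
  induction k with
  | zero =>
    intro d _ x
    rw [PySem.List.pyRange_neg_one_eq_nil (by norm_num)]
    simp
  | succ k ih =>
    intro d hk x
    have hklt : k < s.length := by omega
    have hc1 : ((k + 1 : Nat) : Int) - 1 = (k : Int) := by push_cast; ring
    rw [hc1, PySem.List.pyRange_neg_one_cons (by omega), List.foldl_cons]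
    have hget : PySem.List.pyGetD s (k : Int) 0 = s[k] := by
      simp [PySem.List.pyGetD_natCast, List.getD_eq_getElem?_getD, List.getElem?_eq_getElem hklt]
    rw [hget, ih (d.insert s[k] (k : Int)) (by omega) x,
      List.take_succ_eq_append_getElem hklt]
    by_cases h1 : x ∈ s.take k
    · rw [if_pos h1, if_pos (List.mem_append_left _ h1), List.idxOf_append_of_mem h1]
    · by_cases h2 : x = s[k]
      · subst h2
        rw [if_neg h1, PySem.Dict.get?_insert, if_pos rfl,
          if_pos (List.mem_append_right _ (List.mem_singleton_self _)),
          List.idxOf_append_of_notMem h1]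
        simp [List.length_take, Nat.min_eq_left (Nat.le_of_lt hklt)]
      · rw [if_neg h1, PySem.Dict.get?_insert, if_neg h2, if_neg (fun hmem => by
            rcases List.mem_append.mp hmem with h | h
            · exact h1 h
            · exact h2 (List.mem_singleton.mp h))]

-- scatter: pointwise value of the foldl of pySetD over pairs with distinct positions
theorem pvScatter (g : Int → Int) : ∀ (ps : List (Int × Int)) (arr : List Int) (j : Nat),
    (ps.map (·.2)).Nodup → (∀ p ∈ ps, 0 ≤ p.2 ∧ p.2 < (arr.length : Int)) →
    (ps.foldl (fun (a : List Int) p => PySem.List.pySetD a p.2 (g p.1)) arr)[j]? =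
      match ps.find? (fun p => p.2 == (j : Int)) with
      | some p => some (g p.1)
      | none => arr[j]? := by
  intro ps
  induction ps with
  | nil => intro arr j _ _; simp
  | cons p ps ih =>
    intro arr j hnd hbd
    have hp := hbd p (List.mem_cons_self)
    have hset : PySem.List.pySetD arr p.2 (g p.1) = arr.set p.2.toNat (g p.1) :=
      PySem.List.pySetD_of_nonneg arr (g p.1) hp.1
    have hlen : (arr.set p.2.toNat (g p.1)).length = arr.length := List.length_set
    simp only [List.foldl_cons, hset]
    rw [ih (arr.set p.2.toNat (g p.1)) j (List.nodup_cons.mp (by simpa using hnd)).2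
      (fun q hq => by rw [hlen]; exact hbd q (List.mem_cons_of_mem _ hq))]
    by_cases hj : p.2 = (j : Int)
    · have hfind : ps.find? (fun q => q.2 == (j : Int)) = none := by
        refine List.find?_eq_none.mpr (fun q hq => ?_)
        have : p.2 ∉ ps.map (·.2) := (List.nodup_cons.mp (by simpa using hnd)).1
        simp only [beq_iff_eq]
        intro hq2
        exact this (hj ▸ hq2 ▸ List.mem_map_of_mem hq)
      rw [List.find?_cons_of_pos (by simp [hj]), hfind]
      have hjl : j < arr.length := by
        have := hp.2
        omega
      have ht : p.2.toNat = j := by omega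
      rw [ht]
      exact List.getElem?_set_self hjl
    · rw [List.find?_cons_of_neg (by simp [hj])]
      cases hf : ps.find? (fun q => q.2 == (j : Int)) with
      | some q => rfl
      | none =>
        have : p.2.toNat ≠ j := by
          intro he
          exact hj (by rw [← he, Int.toNat_of_nonneg hp.1])
        exact List.getElem?_set_ne this

-- j is the first occurrence of s[j] iff s[j] does not occur before j
theorem pvIdx1 (s : List Int) (j : Nat) (h : j < s.length) (hnot : s[j] ∉ s.take j) :
    List.idxOf s[j] s = j := by
  have key : ∀ (x : Int), x = s[j] → x ∉ s.take j → List.idxOf x s = j := by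
    intro x hx hnot'
    conv_lhs => rw [← List.take_append_drop j s]
    rw [List.idxOf_append_of_notMem hnot', List.drop_eq_getElem_cons h, List.idxOf_cons, hx]
    simp [List.length_take, Nat.min_eq_left (Nat.le_of_lt h)]
  exact key s[j] rfl hnot

theorem pvIdx2 (s : List Int) (j : Nat) (x : Int) (hx : x ∈ s)
    (he : List.idxOf x s = j) : x = s[j]'(he ▸ List.idxOf_lt_length_of_mem hx) ∧ s[j]'(he ▸ List.idxOf_lt_length_of_mem hx) ∉ s.take j := by
  have hlt := List.idxOf_lt_length_of_mem hx
  subst he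
  refine ⟨(List.getElem_idxOf hlt).symm, ?_⟩
  rw [List.getElem_idxOf hlt]
  intro hmem
  have h4 : List.idxOf x s = List.idxOf x (s.take (List.idxOf x s)) := by
    conv_lhs => rw [← List.take_append_drop (List.idxOf x s) s, List.idxOf_append_of_mem hmem]
  have h5 := List.idxOf_lt_length_of_mem hmem
  rw [List.length_take] at h5
  omega

-- B's first two passes produce exactly the first-occurrence delta list
theorem pvContrib (s : List Int) :
    (((PySem.List.pyRange ((s.length : Int) - 1) (-1) (-1)).foldl
        (fun (d : PySem.Dict Int Int) i => d.insert (PySem.List.pyGetD s i 0) i)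
        PySem.Dict.empty).items.foldl
      (fun (arr : List Int) p => PySem.List.pySetD arr p.2 (pvPowBase p.1))
      (List.replicate s.length (0 : Int)))
    = pvDeltas PySem.Set.empty s := by
  set D := ((PySem.List.pyRange ((s.length : Int) - 1) (-1) (-1)).foldl
      (fun (d : PySem.Dict Int Int) i => d.insert (PySem.List.pyGetD s i 0) i)
      PySem.Dict.empty) with hD
  have hnd : D.keys.Nodup :=
    PySem.Dict.nodup_keys_foldl_insert_key _ (fun i => PySem.List.pyGetD s i 0)
      (fun _ i => i) PySem.Dict.empty PySem.Dict.nodup_keys_empty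
  have hget : ∀ x, D.get? x = if x ∈ s then some ((List.idxOf x s : Nat) : Int) else none := by
    intro x
    have h := pvDict_loop s s.length PySem.Dict.empty (le_refl _) x
    simpa [List.take_length, PySem.Dict.get?_empty] using h
  have hmemkeys : ∀ x, x ∈ D.keys ↔ x ∈ s := by
    intro x
    constructor
    · intro hk
      by_contra hxs
      exact ((PySem.Dict.get?_eq_none_iff_not_mem_keys D x).mp (by rw [hget x, if_neg hxs])) hk
    · intro hxs
      by_contra hk
      have h := (PySem.Dict.get?_eq_none_iff_not_mem_keys D x).mpr hk
      rw [hget x, if_pos hxs] at h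
      cases h
  have hitems : D.items = D.keys.map (fun x => (x, ((List.idxOf x s : Nat) : Int))) := by
    rw [PySem.Dict.items_eq_map_keys D hnd 0]
    refine List.map_congr_left (fun x hx => ?_)
    rw [PySem.Dict.getD_eq_get?_getD, hget x, if_pos ((hmemkeys x).mp hx)]
    rfl
  have hnd2 : (D.items.map (·.2)).Nodup := by
    rw [hitems, List.map_map]
    refine (List.nodup_map_iff_inj_on hnd).mpr (fun x hx y hy hxy => ?_)
    have hix : List.idxOf x s = List.idxOf y s := by simpa using hxy
    have h1 := List.getElem_idxOf (List.idxOf_lt_length_of_mem ((hmemkeys x).mp hx))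
    have h2 := List.getElem_idxOf (List.idxOf_lt_length_of_mem ((hmemkeys y).mp hy))
    rw [← h1, ← h2]
    congr 1
  have hbd2 : ∀ p ∈ D.items, 0 ≤ p.2 ∧ p.2 < ((List.replicate s.length (0 : Int)).length : Int) := by
    intro p hp
    rw [hitems] at hp
    obtain ⟨x, hx, rfl⟩ := List.mem_map.mp hp
    constructor
    · show (0 : Int) ≤ ((List.idxOf x s : Nat) : Int)
      positivity
    · show ((List.idxOf x s : Nat) : Int) < ((List.replicate s.length (0 : Int)).length : Int)
      rw [List.length_replicate]
      exact_mod_cast List.idxOf_lt_length_of_mem ((hmemkeys x).mp hx)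
  refine List.ext_getElem? (fun j => ?_)
  rw [pvScatter pvPowBase D.items _ j hnd2 hbd2]
  have hre : PySem.Set.empty = PySem.Set.ofList ([] : List Int) := rfl
  rw [hre, pvDeltas_getElem? s [] j]
  by_cases hj : j < s.length
  · by_cases hin : s[j] ∈ s.take j
    · have hfind : D.items.find? (fun p => p.2 == (j : Int)) = none := by
        refine List.find?_eq_none.mpr (fun p hp => ?_)
        rw [hitems] at hp
        obtain ⟨x, hx, rfl⟩ := List.mem_map.mp hp
        simp only [beq_iff_eq]
        intro hq
        have hij : List.idxOf x s = j := by exact_mod_cast hq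
        exact (pvIdx2 s j x ((hmemkeys x).mp hx) hij).2 hin
      rw [hfind]
      simp [hj, hin]
    · have hjmem : (s[j], (j : Int)) ∈ D.items := by
        rw [hitems]
        refine List.mem_map.mpr ⟨s[j], (hmemkeys s[j]).mpr (List.getElem_mem hj), ?_⟩
        rw [pvIdx1 s j hj hin]
      have hsome : (D.items.find? (fun p => p.2 == (j : Int))).isSome :=
        List.find?_isSome.mpr ⟨(s[j], (j : Int)), hjmem, by simp⟩
      cases hf : D.items.find? (fun p => p.2 == (j : Int)) with
      | none => rw [hf] at hsome; cases hsome
      | some p =>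
        have hpmem := List.mem_of_find?_eq_some hf
        have hpred := List.find?_some hf
        rw [hitems] at hpmem
        obtain ⟨x, hx, rfl⟩ := List.mem_map.mp hpmem
        have hij : List.idxOf x s = j := by
          have := hpred
          simp only [beq_iff_eq] at this
          exact_mod_cast this
        have hxe := (pvIdx2 s j x ((hmemkeys x).mp hx) hij).1
        rw [hxe]
        simp [List.getElem?_eq_getElem hj, hin]
  · have hfind : D.items.find? (fun p => p.2 == (j : Int)) = none := by
      refine List.find?_eq_none.mpr (fun p hp => ?_)
      rw [hitems] at hp
      obtain ⟨x, hx, rfl⟩ := List.mem_map.mp hp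
      simp only [beq_iff_eq]
      intro hq
      have hij : List.idxOf x s = j := by exact_mod_cast hq
      have := List.idxOf_lt_length_of_mem ((hmemkeys x).mp hx)
      omega
    rw [hfind]
    simp [hj]

-- ===== VERDICT (by name: the statement is the Claim_ definition above) =====
theorem rolling_hash_spec : Claim_equal_rolling_hash := by
  intro s _
  unfold Spec_rolling_hash
  rw [pvA_eq]
  show _ = rolling_hash_alt s
  simp only [rolling_hash_alt]
  rw [pvB_pass3, pvContrib,
    pvBridge s PySem.Set.empty 0 (le_refl 0) (by norm_num [pvMod])]
  rfl
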